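-- pv_equiv track=rewrite | github.com/zarSou9/tr-migrator | convert_to_directories.py | get_node_id_idxs
-- ===== SOURCE A (Python) =====
-- def get_node_id_idxs(node_id: str, only_node_ids: bool = True) -> list[int]:
--     idxs = []
--     in_closure = None
--     for char in node_id[1:]:
--         if in_closure is not None:
--             if char == ".":
--                 idxs.append(int(in_closure))
--                 in_closure = None
--             else:
--                 in_closure += char
--         else:
--             if char == ".":
--                 in_closure = ""
--             else:
--                 idxs.append(int(char))
--
--     return [idx for i, idx in enumerate(idxs) if not only_node_ids or i % 2 != 0]
-- ===== SOURCE B (Python) =====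
-- def get_node_id_idxs(node_id: str, only_node_ids: bool = True) -> list[int]:
--     def walk(segs):
--         # segs[0] is outside any closure: one index per character;
--         # segs[1] (if followed by more) is a closed ".n." closure; a trailing
--         # odd segment is an unterminated closure and yields nothing.
--         out = [int(ch) for ch in segs[0]]
--         if len(segs) > 2:
--             out.append(int(segs[1]))
--             out += walk(segs[2:])
--         return out
--
--     idxs = walk(node_id[1:].split("."))
--     return [idx for i, idx in enumerate(idxs) if not only_node_ids or i % 2 != 0]
-- ===== Notes on version B (the rewrite author's own statement) =====
-- stated objective: simpler
-- what changed: Replaces the char-by-char mode-toggling state machine (in_closure accumulator) with a tokenize-first approach: split the tail into dot-separated segments once and walk the segments pairwise (chars of an even segment individually, a closed odd segment as one int, a trailing odd segment dropped).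
import Mathlib
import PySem

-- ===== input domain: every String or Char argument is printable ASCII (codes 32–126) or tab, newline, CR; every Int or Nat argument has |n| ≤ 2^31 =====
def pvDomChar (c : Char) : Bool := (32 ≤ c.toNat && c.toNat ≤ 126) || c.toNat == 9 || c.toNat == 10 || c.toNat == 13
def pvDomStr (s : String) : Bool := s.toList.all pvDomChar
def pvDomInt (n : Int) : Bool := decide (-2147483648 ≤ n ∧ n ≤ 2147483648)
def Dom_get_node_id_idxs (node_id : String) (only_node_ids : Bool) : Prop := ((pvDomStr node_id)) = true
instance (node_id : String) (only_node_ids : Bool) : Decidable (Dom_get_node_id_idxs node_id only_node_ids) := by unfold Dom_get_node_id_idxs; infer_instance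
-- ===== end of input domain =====

-- B replaces A's char-by-char mode-toggling state machine with tokenize-first
-- (split the tail on '.' once, then walk the segments pairwise): simpler, same cost.

-- ===== PORT A =====
-- shared final list comprehension '[idx for i, idx in enumerate(idxs) if not only_node_ids or i % 2 != 0]'
-- (this line of Python is identical in A and in B)
def pvFilterOnly (only_node_ids : Bool) (idxs : List Int) : List Int :=
  (PySem.List.enumerate idxs).filterMap
    (fun p => if !only_node_ids || decide (PySem.Int.mod p.1 2 ≠ 0) then some p.2 else none)

-- one step of A's for-loop; state = (idxs, in_closure); int(...) raising = ofChars? none,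
-- totalised with getD 0 — exactly those inputs are excluded by Pre_ below
def pvStepA (st : List Int × Option (List Char)) (c : Char) : List Int × Option (List Char) :=
  match st.2 with
  | some cl =>
      if c = '.' then (st.1 ++ [(PySem.Int.ofChars? cl).getD 0], none)
      else (st.1, some (cl ++ [c]))
  | none =>
      if c = '.' then (st.1, some [])
      else (st.1 ++ [(PySem.Int.ofChars? [c]).getD 0], none)

def get_node_id_idxs (node_id : String) (only_node_ids : Bool) : List Int :=
  let st := (PySem.List.slice node_id.toList (some 1) none).foldl pvStepA ([], none)
  pvFilterOnly only_node_ids st.1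

-- ===== PORT B =====
-- hand port of Python's str.split("."): exact for this fixed one-character separator
def pvSplitDot : List Char → List (List Char)
  | [] => [[]]
  | c :: cs =>
      if c = '.' then [] :: pvSplitDot cs
      else
        match pvSplitDot cs with
        | [] => [[c]]
        | s :: ss => (c :: s) :: ss

-- B's recursive 'walk' over the segments
def pvWalk : List (List Char) → List Int
  | [] => []
  | s0 :: rest =>
      let out := s0.map (fun c => (PySem.Int.ofChars? [c]).getD 0)
      match rest with
      | s1 :: s2 :: rest' => out ++ (PySem.Int.ofChars? s1).getD 0 :: pvWalk (s2 :: rest')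
      | _ => out

def get_node_id_idxs_alt (node_id : String) (only_node_ids : Bool) : List Int :=
  pvFilterOnly only_node_ids
    (pvWalk (pvSplitDot (PySem.List.slice node_id.toList (some 1) none)))

-- ===== PRECONDITION & SPEC =====
-- Pre_ excludes exactly the inputs on which A raises ValueError from int(...):
-- an even-position dotted segment with a character that is not a one-digit int, or an
-- odd-position non-final segment that does not parse as a Python int.  Stated over the
-- library tokenisation PySem.Chars.splitOn (Python's str.split), not over either port.
mutual
def pvPreEven : List (List Char) → Bool
  | [] => true
  | s :: rest => s.all (fun c => (PySem.Int.ofChars? [c]).isSome) && pvPreOdd rest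
def pvPreOdd : List (List Char) → Bool
  | [] => true
  | [_] => true
  | s :: rest => (PySem.Int.ofChars? s).isSome && pvPreEven rest
end

def Pre_get_node_id_idxs (node_id : String) (only_node_ids : Bool) : Prop :=
  pvPreEven (PySem.Chars.splitOn (PySem.List.slice node_id.toList (some 1) none) ['.']) = true

instance (node_id : String) (only_node_ids : Bool) : Decidable (Pre_get_node_id_idxs node_id only_node_ids) := by
  unfold Pre_get_node_id_idxs; infer_instance

def pvWitness_get_node_id_idxs : String × Bool := ("x1.23.4", true)

def Spec_get_node_id_idxs (node_id : String) (only_node_ids : Bool) (out : List Int) : Prop := out = get_node_id_idxs_alt node_id only_node_ids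
instance (node_id : String) (only_node_ids : Bool) (out : List Int) : Decidable (Spec_get_node_id_idxs node_id only_node_ids out) := by unfold Spec_get_node_id_idxs; infer_instance

-- ===== CLAIM (what is proved, stated in full; the proofs are below) =====
def Claim_equal_get_node_id_idxs : Prop := ∀ (node_id : String) (only_node_ids : Bool), Dom_get_node_id_idxs node_id only_node_ids → Pre_get_node_id_idxs node_id only_node_ids → Spec_get_node_id_idxs node_id only_node_ids (get_node_id_idxs node_id only_node_ids)

-- ===== LEMMAS AND PROOFS =====

theorem pvSplitDot_ne_nil (cs : List Char) : pvSplitDot cs ≠ [] := by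
  cases cs with
  | nil => simp [pvSplitDot]
  | cons c cs =>
      simp only [pvSplitDot]
      split
      · simp
      · cases h : pvSplitDot cs <;> simp

-- the core invariant: A's state machine, run from either mode, computes what B's
-- tokenize-then-walk computes
theorem pv_main (cs : List Char) :
    (∀ acc, (cs.foldl pvStepA (acc, none)).1 = acc ++ pvWalk (pvSplitDot cs)) ∧
    (∀ acc cl, (cs.foldl pvStepA (acc, some cl)).1 =
      acc ++ (match pvSplitDot cs with
              | [] => []
              | [_] => []
              | s :: rest => (PySem.Int.ofChars? (cl ++ s)).getD 0 :: pvWalk rest)) := by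
  induction cs with
  | nil =>
      refine ⟨?_, ?_⟩
      · intro acc; simp [pvSplitDot, pvWalk]
      · intro acc cl; simp [pvSplitDot]
  | cons c cs ih =>
      obtain ⟨ih1, ih2⟩ := ih
      refine ⟨?_, ?_⟩
      · intro acc
        simp only [List.foldl_cons]
        by_cases hc : c = '.'
        · rw [show pvStepA (acc, none) c = (acc, some []) by simp [pvStepA, hc]]
          rw [ih2, show pvSplitDot (c :: cs) = [] :: pvSplitDot cs by simp [pvSplitDot, hc]]
          cases h : pvSplitDot cs with
          | nil => exact absurd h (pvSplitDot_ne_nil cs)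
          | cons s rest =>
              cases rest with
              | nil => simp [pvWalk]
              | cons s2 rest' => simp [pvWalk]
        · rw [show pvStepA (acc, none) c
                = (acc ++ [(PySem.Int.ofChars? [c]).getD 0], none) by simp [pvStepA, hc]]
          rw [ih1]
          cases h : pvSplitDot cs with
          | nil => exact absurd h (pvSplitDot_ne_nil cs)
          | cons s rest =>
              rw [show pvSplitDot (c :: cs) = (c :: s) :: rest by simp [pvSplitDot, hc, h]]
              cases rest with
              | nil => simp [pvWalk]
              | cons s2 rest' =>
                  cases rest' with
                  | nil => simp [pvWalk]
                  | cons s3 rest'' => simp [pvWalk]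
      · intro acc cl
        simp only [List.foldl_cons]
        by_cases hc : c = '.'
        · rw [show pvStepA (acc, some cl) c
                = (acc ++ [(PySem.Int.ofChars? cl).getD 0], none) by simp [pvStepA, hc]]
          rw [ih1, show pvSplitDot (c :: cs) = [] :: pvSplitDot cs by simp [pvSplitDot, hc]]
          cases h : pvSplitDot cs with
          | nil => exact absurd h (pvSplitDot_ne_nil cs)
          | cons s rest => simp
        · rw [show pvStepA (acc, some cl) c = (acc, some (cl ++ [c])) by simp [pvStepA, hc]]
          rw [ih2]
          cases h : pvSplitDot cs with
          | nil => exact absurd h (pvSplitDot_ne_nil cs)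
          | cons s rest =>
              rw [show pvSplitDot (c :: cs) = (c :: s) :: rest by simp [pvSplitDot, hc, h]]
              cases rest with
              | nil => simp
              | cons s2 rest' => simp

-- ===== VERDICT (by name: the statement is the Claim_ definition above) =====
theorem get_node_id_idxs_spec : Claim_equal_get_node_id_idxs := by
  intro node_id only_node_ids _ _
  unfold Spec_get_node_id_idxs get_node_id_idxs get_node_id_idxs_alt
  exact congrArg (pvFilterOnly only_node_ids)
    ((pv_main (PySem.List.slice node_id.toList (some 1) none)).1 [])
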